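-- pv_equiv track=rewrite | github.com/niinasaarelainen/omat-python-projektit2020 | advent calender2015/05/strings_b.py | tutkiKirjaimet
-- ===== SOURCE A (Python) =====
-- def tutkiKirjaimet(kirjaimet):
--     for values in kirjaimet.values():
--         if len(values) > 1:
--             for i in range(len(values) -1):
--                 v = values[i]
--                 if v + 2 in values:
--                     return True
--                 if v - 2 in values:
--                     return True
--     return False
-- ===== SOURCE B (Python) =====
-- def tutkiKirjaimet(kirjaimet):
--     for values in kirjaimet.values():
--         s = sorted(values)
--         n = len(s)
--         i = j = 0
--         while j < n:
--             d = s[j] - s[i]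
--             if d == 2:
--                 return True
--             if d < 2:
--                 j += 1
--             else:
--                 i += 1
--     return False
-- ===== Notes on version B (the rewrite author's own statement) =====
-- stated objective: alternative
-- what changed: Replaces A's nested loop with repeated O(n) membership scans (v+2 in values / v-2 in values for each position) by sorting each value list and running a single two-pointer sweep that looks for a gap of exactly 2.
import Mathlib
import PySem

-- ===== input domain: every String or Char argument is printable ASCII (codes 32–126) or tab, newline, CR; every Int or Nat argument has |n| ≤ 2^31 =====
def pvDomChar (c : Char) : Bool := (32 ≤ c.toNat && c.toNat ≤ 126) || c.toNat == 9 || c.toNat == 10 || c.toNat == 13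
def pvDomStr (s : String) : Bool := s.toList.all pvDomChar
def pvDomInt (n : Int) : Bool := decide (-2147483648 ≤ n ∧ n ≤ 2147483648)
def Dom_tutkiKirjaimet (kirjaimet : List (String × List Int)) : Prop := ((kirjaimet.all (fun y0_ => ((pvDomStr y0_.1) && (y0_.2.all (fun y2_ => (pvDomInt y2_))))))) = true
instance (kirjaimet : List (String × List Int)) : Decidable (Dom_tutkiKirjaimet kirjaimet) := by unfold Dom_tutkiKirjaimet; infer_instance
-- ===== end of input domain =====

-- B replaces A's per-position '±2 in values' membership scans by sorting each list and running a two-pointer sweep (alternative decomposition).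

-- ===== PORT A =====
-- inner body of A's loop over one dict value list
def tutkiKirjaimetInner (values : List Int) : Bool :=
  if values.length > 1 then
    (PySem.List.pyRange 0 ((values.length : Int) - 1) 1).any (fun i =>
      let v := PySem.List.pyGetD values i 0
      values.contains (v + 2) || values.contains (v - 2))
  else false

def tutkiKirjaimet (kirjaimet : List (String × List Int)) : Bool :=
  (PySem.Dict.values (PySem.Dict.ofList kirjaimet)).any tutkiKirjaimetInner

-- ===== PORT B =====
-- the 'while j < n' two-pointer sweep of Source B; fuel 2*n+1 suffices since i+j grows each step and i ≤ j < n
def tpLoop (s : List Int) : Nat → Nat → Nat → Bool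
  | 0, _, _ => false
  | fuel + 1, i, j =>
    if j < s.length then
      let d := s.getD j 0 - s.getD i 0
      if d = 2 then true
      else if d < 2 then tpLoop s fuel i (j + 1)
      else tpLoop s fuel (i + 1) j
    else false

def tutkiKirjaimetAltInner (values : List Int) : Bool :=
  let s := PySem.List.sorted values (fun x => x) false
  tpLoop s (2 * s.length + 1) 0 0

def tutkiKirjaimet_alt (kirjaimet : List (String × List Int)) : Bool :=
  (PySem.Dict.values (PySem.Dict.ofList kirjaimet)).any tutkiKirjaimetAltInner

-- ===== PRECONDITION & SPEC =====
def Spec_tutkiKirjaimet (kirjaimet : List (String × List Int)) (out : Bool) : Prop := out = tutkiKirjaimet_alt kirjaimet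
instance (kirjaimet : List (String × List Int)) (out : Bool) : Decidable (Spec_tutkiKirjaimet kirjaimet out) := by unfold Spec_tutkiKirjaimet; infer_instance

-- ===== CLAIM (what is proved, stated in full; the proofs are below) =====
def Claim_equal_tutkiKirjaimet : Prop := ∀ (kirjaimet : List (String × List Int)), Dom_tutkiKirjaimet kirjaimet → Spec_tutkiKirjaimet kirjaimet (tutkiKirjaimet kirjaimet)

-- ===== LEMMAS AND PROOFS =====

-- the common characterisation: the list holds two entries differing by exactly 2
def HasGapTwo (l : List Int) : Prop := ∃ x ∈ l, (x + 2) ∈ l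

theorem innerA_iff (l : List Int) : tutkiKirjaimetInner l = true ↔ HasGapTwo l := by
  unfold tutkiKirjaimetInner HasGapTwo
  by_cases h : l.length > 1
  · rw [if_pos h]
    simp only [List.any_eq_true, PySem.List.mem_pyRange_one, Bool.or_eq_true,
      List.contains_eq_mem, decide_eq_true_eq]
    constructor
    · rintro ⟨i, ⟨h0, hi⟩, hc⟩
      have hv : PySem.List.pyGetD l i 0 ∈ l := by
        have hi' : i = ((i.toNat : Nat) : Int) := by omega
        rw [hi', PySem.List.pyGetD_natCast,
          List.getD_eq_getElem _ _ (show i.toNat < l.length by omega)]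
        exact List.getElem_mem _
      rcases hc with hc | hc
      · exact ⟨_, hv, hc⟩
      · exact ⟨_, hc, by simpa using hv⟩
    · rintro ⟨x, hx, hx2⟩
      obtain ⟨a, ha, hae⟩ := List.mem_iff_getElem.mp hx
      obtain ⟨b, hb, hbe⟩ := List.mem_iff_getElem.mp hx2
      have hab : a ≠ b := by
        intro hcon; subst hcon; rw [hbe] at hae; omega
      rcases Nat.lt_or_ge a b with hlt | hge
      · refine ⟨(a : Int), ⟨by omega, by omega⟩, Or.inl ?_⟩
        have : PySem.List.pyGetD l (a : Int) 0 = l[a] := by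
          rw [PySem.List.pyGetD_natCast, List.getD_eq_getElem _ _ ha]
        rw [this, hae]; exact hx2
      · have hblt : b < a := by omega
        refine ⟨(b : Int), ⟨by omega, by omega⟩, Or.inr ?_⟩
        have : PySem.List.pyGetD l (b : Int) 0 = l[b] := by
          rw [PySem.List.pyGetD_natCast, List.getD_eq_getElem _ _ hb]
        rw [this, hbe]
        have : x + 2 - 2 = x := by omega
        rw [this]; exact hx
  · rw [if_neg h]
    simp only [Bool.false_eq_true, false_iff]
    rintro ⟨x, hx, hx2⟩
    rcases l with _ | ⟨y, _ | ⟨z, t⟩⟩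
    · simp at hx
    · simp only [List.mem_singleton] at hx hx2; omega
    · exfalso; apply h; simp only [List.length_cons]; omega

theorem tp_sound (s : List Int) :
    ∀ fuel i j, i ≤ j → tpLoop s fuel i j = true →
      ∃ a b, a < b ∧ b < s.length ∧ s.getD b 0 - s.getD a 0 = 2 := by
  intro fuel
  induction fuel with
  | zero => intro i j _ h; simp [tpLoop] at h
  | succ fuel ih =>
    intro i j hij h
    simp only [tpLoop] at h
    by_cases hj : j < s.length
    · rw [if_pos hj] at h
      by_cases hd : s.getD j 0 - s.getD i 0 = 2
      · refine ⟨i, j, ?_, hj, hd⟩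
        rcases eq_or_lt_of_le hij with h' | h'
        · subst h'; simp at hd
        · exact h'
      · rw [if_neg hd] at h
        by_cases hlt : s.getD j 0 - s.getD i 0 < 2
        · rw [if_pos hlt] at h; exact ih i (j + 1) (by omega) h
        · rw [if_neg hlt] at h
          exact ih (i + 1) j (by
            rcases eq_or_lt_of_le hij with h' | h'
            · exfalso; subst h'; simp at hlt
            · omega) h
    · rw [if_neg hj] at h; simp at h

theorem tp_false (s : List Int)
    (hs : ∀ p q, p ≤ q → q < s.length → s.getD p 0 ≤ s.getD q 0) :
    ∀ fuel i j, 2 * s.length ≤ fuel + i + j → i ≤ j →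
      (∀ a b, a < b → b < j → s.getD b 0 - s.getD a 0 ≠ 2) →
      (∀ a, a < i → j < s.length → 2 < s.getD j 0 - s.getD a 0) →
      tpLoop s fuel i j = false →
      ∀ a b, a < b → b < s.length → s.getD b 0 - s.getD a 0 ≠ 2 := by
  intro fuel
  induction fuel with
  | zero =>
    intro i j hfuel hij h2 _ _ a b hab hb
    by_cases hj : j < s.length
    · omega
    · exact h2 a b hab (by omega)
  | succ fuel ih =>
    intro i j hfuel hij h2 h3 hloop a b hab hb
    simp only [tpLoop] at hloop
    by_cases hj : j < s.length
    · rw [if_pos hj] at hloop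
      by_cases hd : s.getD j 0 - s.getD i 0 = 2
      · rw [if_pos hd] at hloop; simp at hloop
      · rw [if_neg hd] at hloop
        by_cases hlt : s.getD j 0 - s.getD i 0 < 2
        · rw [if_pos hlt] at hloop
          refine ih i (j + 1) (by omega) (by omega) ?_ ?_ hloop a b hab hb
          · intro a' b' hab' hb'
            by_cases hbj : b' = j
            · subst hbj
              by_cases hai : a' < i
              · have := h3 a' hai hj; omega
              · have := hs i a' (by omega) (by omega)
                omega
            · exact h2 a' b' hab' (by omega)
          · intro a' ha' hj1
            have h1 := h3 a' ha' hj
            have h2' := hs j (j + 1) (by omega) hj1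
            omega
        · rw [if_neg hlt] at hloop
          have hij' : i < j := by
            rcases eq_or_lt_of_le hij with h' | h'
            · exfalso; subst h'; simp at hlt
            · exact h'
          refine ih (i + 1) j (by omega) (by omega) h2 ?_ hloop a b hab hb
          intro a' ha' _
          have := hs a' i (by omega) (by omega)
          omega
    · rw [if_neg hj] at hloop
      exact h2 a b hab (by omega)

theorem pair_iff_gap (s : List Int)
    (hs : ∀ p q, p ≤ q → q < s.length → s.getD p 0 ≤ s.getD q 0) :
    (∃ a b, a < b ∧ b < s.length ∧ s.getD b 0 - s.getD a 0 = 2) ↔ HasGapTwo s := by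
  unfold HasGapTwo
  constructor
  · rintro ⟨a, b, hab, hb, hd⟩
    have ha : a < s.length := by omega
    refine ⟨s.getD a 0, ?_, ?_⟩
    · rw [List.getD_eq_getElem _ _ ha]; exact List.getElem_mem _
    · have heq : s.getD a 0 + 2 = s.getD b 0 := by omega
      rw [heq, List.getD_eq_getElem _ _ hb]; exact List.getElem_mem _
  · rintro ⟨x, hx, hx2⟩
    obtain ⟨a, ha, hae⟩ := List.mem_iff_getElem.mp hx
    obtain ⟨b, hb, hbe⟩ := List.mem_iff_getElem.mp hx2
    have hga : s.getD a 0 = x := by rw [List.getD_eq_getElem _ _ ha, hae]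
    have hgb : s.getD b 0 = x + 2 := by rw [List.getD_eq_getElem _ _ hb, hbe]
    have hab : a < b := by
      by_contra hc
      have := hs b a (by omega) ha
      omega
    exact ⟨a, b, hab, hb, by omega⟩

theorem innerB_iff (l : List Int) : tutkiKirjaimetAltInner l = true ↔ HasGapTwo l := by
  unfold tutkiKirjaimetAltInner
  set s := PySem.List.sorted l (fun x => x) false with hsdef
  have hperm : s.Perm l := PySem.List.sorted_perm l (fun x => x) false
  have hpw : s.Pairwise (fun a b => a ≤ b) := PySem.List.sorted_pairwise l (fun x => x)
  have hs : ∀ p q, p ≤ q → q < s.length → s.getD p 0 ≤ s.getD q 0 := by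
    intro p q hpq hq
    rw [List.getD_eq_getElem _ _ (by omega), List.getD_eq_getElem _ _ hq]
    rcases eq_or_lt_of_le hpq with h' | h'
    · subst h'; exact le_refl _
    · exact List.pairwise_iff_getElem.mp hpw p q (by omega) hq h'
  show tpLoop s (2 * s.length + 1) 0 0 = true ↔ HasGapTwo l
  constructor
  · intro h
    obtain ⟨a, b, hab, hb, hd⟩ := tp_sound s _ 0 0 (le_refl 0) h
    obtain ⟨x, hx, hx2⟩ := (pair_iff_gap s hs).mp ⟨a, b, hab, hb, hd⟩
    exact ⟨x, hperm.mem_iff.mp hx, hperm.mem_iff.mp hx2⟩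
  · intro hgap
    obtain ⟨x, hx, hx2⟩ := hgap
    have hgs : HasGapTwo s := ⟨x, hperm.mem_iff.mpr hx, hperm.mem_iff.mpr hx2⟩
    by_contra hfalse
    have hf : tpLoop s (2 * s.length + 1) 0 0 = false := Bool.eq_false_iff.mpr hfalse
    have hnone := tp_false s hs (2 * s.length + 1) 0 0 (by omega) (le_refl 0)
      (by intro a b _ hb; omega) (by intro a ha _; omega) hf
    obtain ⟨a, b, hab, hb, hd⟩ := (pair_iff_gap s hs).mpr hgs
    exact hnone a b hab hb hd

theorem inner_eq (l : List Int) : tutkiKirjaimetInner l = tutkiKirjaimetAltInner l := by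
  rw [Bool.eq_iff_iff, innerA_iff, innerB_iff]

-- ===== VERDICT (by name: the statement is the Claim_ definition above) =====
theorem tutkiKirjaimet_spec : Claim_equal_tutkiKirjaimet := by
  intro kirjaimet _
  unfold Spec_tutkiKirjaimet tutkiKirjaimet tutkiKirjaimet_alt
  rw [show tutkiKirjaimetInner = tutkiKirjaimetAltInner from funext inner_eq]
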